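-- pv_equiv track=rewrite | github.com/SadiaZahin/auctionbot | auctionbot.py | is_painting_required
-- ===== SOURCE A (Python) =====
-- def is_painting_required(painting_collection_org, painting):
-- 	painting_collection = painting_collection_org.copy()
-- 	painting_collection = sorted(painting_collection.items(), key=lambda x: x[1], reverse=True)
-- 	painting_collection = dict(painting_collection)
-- 	painting_freq = [0, 0, 0, 0]  # The frequency of all occurrences of the paintings
-- 	for key in painting_collection:
-- 		f = painting_collection[key]
-- 		if f <= 3:
-- 			painting_freq[f] += 1
--
-- 	if painting_collection[painting] == 0:
-- 		if painting_freq[1] + painting_freq[2] + painting_freq[3] < 3:  # Improve the set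
-- 			return True
-- 		return False
-- 	if painting_collection[painting] == 1:
-- 		if painting_freq[2] + painting_freq[3] < 2:  # Improve the set
-- 			return True
-- 		return False
-- 	if painting_collection[painting] == 2:  # Improve the set
-- 		if painting_freq[3] < 1:
-- 			return True
-- 		return False
--
-- 	return False
-- ===== SOURCE B (Python) =====
-- def is_painting_required(painting_collection_org, painting):
--     c = painting_collection_org[painting]
--     if c < 0 or c > 2:
--         return False
--     k = 3 - c
--     vals = sorted((v for v in painting_collection_org.values() if v <= 3), reverse=True)
--     return len(vals) < k or vals[k - 1] <= c
-- ===== Notes on version B (the rewrite author's own statement) =====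
-- stated objective: alternative
-- what changed: B replaces A's histogram-plus-three-way-branch by an order-statistic test: it sorts the values <= 3 in descending order and checks whether the (3-c)-th largest such value (c = the painting's own count) fails to exceed c, i.e. whether a slot in the top 3-c is still free.
-- outside the precondition, e.g. on is_painting_required({'p': 2, 'q': -1}, 'p'): A returns False, B returns True
import Mathlib
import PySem

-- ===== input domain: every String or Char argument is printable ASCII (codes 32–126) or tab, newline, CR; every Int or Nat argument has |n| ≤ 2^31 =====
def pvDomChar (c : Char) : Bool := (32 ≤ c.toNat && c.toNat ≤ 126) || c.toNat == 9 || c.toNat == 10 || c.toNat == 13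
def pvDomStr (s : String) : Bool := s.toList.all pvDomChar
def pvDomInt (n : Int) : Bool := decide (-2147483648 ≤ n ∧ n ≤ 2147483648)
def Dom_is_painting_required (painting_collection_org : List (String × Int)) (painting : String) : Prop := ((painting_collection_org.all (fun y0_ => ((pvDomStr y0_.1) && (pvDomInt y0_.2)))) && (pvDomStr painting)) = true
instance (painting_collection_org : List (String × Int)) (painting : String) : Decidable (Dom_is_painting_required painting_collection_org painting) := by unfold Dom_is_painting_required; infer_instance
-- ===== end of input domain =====

-- B replaces A's 4-bucket frequency table and three-way branch by an order-statistic test: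
-- sort the values ≤ 3 descending and check whether the (3-c)-th largest of them is ≤ c
-- (objective: alternative algorithm of similar cost).

-- ===== PORT A =====
-- literal transliteration of A: copy, sort items by value descending, rebuild the dict,
-- tally a 4-slot frequency list over the dict's values, then the three-way branch.
def is_painting_required (painting_collection_org : List (String × Int)) (painting : String) : Bool :=
  let painting_collection :=
    PySem.Dict.ofList (PySem.List.sorted painting_collection_org (fun x => x.2) true)
  let painting_freq : List Int := [0, 0, 0, 0]
  let painting_freq :=
    painting_collection.keys.foldl (fun freq key =>
      let f := painting_collection.getD key 0
      if f ≤ 3 then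
        -- painting_freq[f] += 1  (negative f would wrap / raise in Python; outside Pre_)
        PySem.List.pySetD freq f (PySem.List.pyGetD freq f 0 + 1)
      else freq) painting_freq
  -- painting_collection[painting]: KeyError when absent (outside Pre_), ported as getD 0
  let cp := painting_collection.getD painting 0
  if cp = 0 then
    if PySem.List.pyGetD painting_freq 1 0 + PySem.List.pyGetD painting_freq 2 0 +
        PySem.List.pyGetD painting_freq 3 0 < 3 then true else false
  else if cp = 1 then
    if PySem.List.pyGetD painting_freq 2 0 + PySem.List.pyGetD painting_freq 3 0 < 2 then true
    else false
  else if cp = 2 then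
    if PySem.List.pyGetD painting_freq 3 0 < 1 then true else false
  else false

-- ===== PORT B =====
-- literal transliteration of Source B: direct lookup (first match = dict lookup; KeyError when
-- absent is outside Pre_), guard on c ∈ [0,2], sort the values ≤ 3 descending and test the
-- (3-c)-th largest one.
def is_painting_required_alt (painting_collection_org : List (String × Int)) (painting : String) : Bool :=
  match painting_collection_org.find? (fun kv => kv.1 == painting) with
  | none => false  -- Python raises KeyError here; excluded by Pre_
  | some kv =>
    let c := kv.2
    if c < 0 ∨ c > 2 then false
    else
      let k : Int := 3 - c
      let vals := PySem.List.sorted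
        ((painting_collection_org.map Prod.snd).filter (fun v => decide (v ≤ 3)))
        (fun x => x) true
      if (vals.length : Int) < k then true
      else
        match PySem.List.pyGet? vals (k - 1) with
        | some x => decide (x ≤ c)
        | none => false  -- unreachable: 0 ≤ k - 1 < vals.length here

-- ===== PRECONDITION & SPEC =====
-- Pre_ restricts to the natural domain of a painting-count dictionary: the queried painting is a
-- key (otherwise both programs raise KeyError), keys are distinct (the argument is a Python dict,
-- which cannot hold duplicate keys), and all counts are nonnegative — on a count ≤ -5 A raises
-- IndexError, and for counts -4..-1 A's returned value is a negative-index wraparound artefact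
-- outside the natural domain of collection counts.
def Pre_is_painting_required (painting_collection_org : List (String × Int)) (painting : String) : Prop :=
  (painting_collection_org.map Prod.fst).Nodup ∧
  painting ∈ painting_collection_org.map Prod.fst ∧
  (∀ kv ∈ painting_collection_org, 0 ≤ kv.2)
instance (painting_collection_org : List (String × Int)) (painting : String) : Decidable (Pre_is_painting_required painting_collection_org painting) := by unfold Pre_is_painting_required; infer_instance
def pvWitness_is_painting_required : (List (String × Int)) × String := ([("p", 1), ("q", 3)], "p")

def Spec_is_painting_required (painting_collection_org : List (String × Int)) (painting : String) (out : Bool) : Prop := out = is_painting_required_alt painting_collection_org painting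
instance (painting_collection_org : List (String × Int)) (painting : String) (out : Bool) : Decidable (Spec_is_painting_required painting_collection_org painting out) := by unfold Spec_is_painting_required; infer_instance

-- ===== CLAIM (what is proved, stated in full; the proofs are below) =====
def Claim_equal_is_painting_required : Prop := ∀ (painting_collection_org : List (String × Int)) (painting : String), Dom_is_painting_required painting_collection_org painting → Pre_is_painting_required painting_collection_org painting → Spec_is_painting_required painting_collection_org painting (is_painting_required painting_collection_org painting)

-- ===== LEMMAS AND PROOFS =====

-- first match under distinct keys is THE pair with that key
lemma pv_find_eq {pc : List (String × Int)} {painting : String} {v : Int}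
    (hnd : (pc.map Prod.fst).Nodup) (hmem : (painting, v) ∈ pc) :
    pc.find? (fun kv => kv.1 == painting) = some (painting, v) := by
  induction pc with
  | nil => cases hmem
  | cons hd t ih =>
    simp only [List.map_cons, List.nodup_cons] at hnd
    rcases List.mem_cons.1 hmem with h | h
    · subst h
      simp
    · have hne : hd.1 ≠ painting := by
        intro he
        exact hnd.1 (he ▸ (List.mem_map.2 ⟨(painting, v), h, rfl⟩))
      have hb : (hd.1 == painting) = false := by simp [hne]
      simp only [List.find?_cons, hb]
      exact ih hnd.2 h

-- the frequency-tally fold over nonnegative values, characterised by four counts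
lemma pv_freq_fold (vs : List Int) (h : ∀ v ∈ vs, 0 ≤ v) (a0 a1 a2 a3 : Int) :
    vs.foldl (fun freq f =>
        if f ≤ 3 then PySem.List.pySetD freq f (PySem.List.pyGetD freq f 0 + 1) else freq)
      [a0, a1, a2, a3] =
    [a0 + vs.countP (fun v => decide (v = 0)),
     a1 + vs.countP (fun v => decide (v = 1)),
     a2 + vs.countP (fun v => decide (v = 2)),
     a3 + vs.countP (fun v => decide (v = 3))] := by
  induction vs generalizing a0 a1 a2 a3 with
  | nil => simp
  | cons v t ih =>
    have hv : 0 ≤ v := h v (List.mem_cons_self ..)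
    have ht : ∀ w ∈ t, 0 ≤ w := fun w hw => h w (List.mem_cons_of_mem _ hw)
    by_cases h3 : v ≤ 3
    · have h4 : v = 0 ∨ v = 1 ∨ v = 2 ∨ v = 3 := by omega
      rcases h4 with rfl | rfl | rfl | rfl <;>
      · rw [List.foldl_cons, if_pos (by norm_num), PySem.List.pySetD_of_nonneg _ _ (by norm_num),
          PySem.List.pyGetD_ofNat']
        norm_num [List.getD, List.set, Int.toNat]
        rw [ih ht]
        simp only [List.cons.injEq]
        norm_num
        omega
    · rw [List.foldl_cons, if_neg h3]
      rw [ih ht]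
      have e0 : ¬ (v = 0) := by omega
      have e1 : ¬ (v = 1) := by omega
      have e2 : ¬ (v = 2) := by omega
      have e3 : ¬ (v = 3) := by omega
      simp [e0, e1, e2, e3]

-- splitting the filtered count over nonnegative values, for each admissible own-count
lemma pv_cs0 (vs : List Int) (h : ∀ v ∈ vs, 0 ≤ v) :
    vs.countP (fun v => decide ((0:Int) < v ∧ v ≤ 3)) =
      vs.countP (fun v => decide (v = 1)) + vs.countP (fun v => decide (v = 2)) +
      vs.countP (fun v => decide (v = 3)) := by
  induction vs with
  | nil => simp
  | cons v t ih =>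
    have hv : 0 ≤ v := h v (List.mem_cons_self ..)
    have ht : ∀ w ∈ t, 0 ≤ w := fun w hw => h w (List.mem_cons_of_mem _ hw)
    simp only [List.countP_cons]
    rw [ih ht]
    by_cases hb : (0:Int) < v ∧ v ≤ 3
    · have : v = 1 ∨ v = 2 ∨ v = 3 := by omega
      rcases this with rfl | rfl | rfl <;> (norm_num; try omega)
    · have e1 : ¬ (v = 1) := by omega
      have e2 : ¬ (v = 2) := by omega
      have e3 : ¬ (v = 3) := by omega
      simp [hb, e1, e2, e3]

lemma pv_cs1 (vs : List Int) :
    vs.countP (fun v => decide ((1:Int) < v ∧ v ≤ 3)) =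
      vs.countP (fun v => decide (v = 2)) + vs.countP (fun v => decide (v = 3)) := by
  induction vs with
  | nil => simp
  | cons v t ih =>
    simp only [List.countP_cons]
    rw [ih]
    by_cases hb : (1:Int) < v ∧ v ≤ 3
    · have : v = 2 ∨ v = 3 := by omega
      rcases this with rfl | rfl <;> (norm_num; try omega)
    · have e2 : ¬ (v = 2) := by omega
      have e3 : ¬ (v = 3) := by omega
      simp [hb, e2, e3]

lemma pv_cs2 (vs : List Int) :
    vs.countP (fun v => decide ((2:Int) < v ∧ v ≤ 3)) = vs.countP (fun v => decide (v = 3)) := by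
  induction vs with
  | nil => simp
  | cons v t ih =>
    simp only [List.countP_cons]
    rw [ih]
    by_cases hb : (2:Int) < v ∧ v ≤ 3
    · have : v = 3 := by omega
      subst this; norm_num; try omega
    · have e3 : ¬ (v = 3) := by omega
      simp [hb, e3]

-- rank lemma: in a descending list, the element at index i is ≤ c iff at most i elements exceed c
lemma pv_rank (xs : List Int) (c : Int) (h : xs.Pairwise (fun a b => b ≤ a)) (i : Nat)
    (hi : i < xs.length) :
    (xs[i] ≤ c ↔ xs.countP (fun x => decide (c < x)) ≤ i) := by
  induction xs generalizing i with
  | nil => simp at hi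
  | cons y t ih =>
    rw [List.pairwise_cons] at h
    obtain ⟨hy, ht⟩ := h
    cases i with
    | zero =>
      simp only [List.getElem_cons_zero, List.countP_cons, Nat.le_zero]
      constructor
      · intro hyc
        have h1 : t.countP (fun x => decide (c < x)) = 0 := by
          rw [List.countP_eq_zero]
          intro x hx
          have := hy x hx
          simp only [decide_eq_true_eq]
          omega
        have h2 : ¬ (c < y) := by omega
        simp [h1, h2]
      · intro hz
        by_contra hyc
        have : c < y := by omega
        simp [this] at hz
    | succ i =>
      simp only [List.getElem_cons_succ, List.countP_cons]
      have hi' : i < t.length := by simpa using hi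
      by_cases hcy : c < y
      · simp only [hcy, decide_true, if_pos]
        rw [ih ht i hi']
        omega
      · have hyc : y ≤ c := by omega
        have hti : t[i] ≤ c := le_trans (hy t[i] (List.getElem_mem hi')) hyc
        have hz : t.countP (fun x => decide (c < x)) = 0 := by
          rw [List.countP_eq_zero]
          intro x hx
          have := hy x hx
          simp only [decide_eq_true_eq]
          omega
        simp [hcy, hti, hz]

-- B's sorted-index test equals the threshold count test
lemma pv_alt_rank (xs : List Int) (c : Int) (k : Int) (hk : 1 ≤ k) :
    (let vals := PySem.List.sorted (xs.filter (fun v => decide (v ≤ 3))) (fun x => x) true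
     if (vals.length : Int) < k then true
     else
       match PySem.List.pyGet? vals (k - 1) with
       | some x => decide (x ≤ c)
       | none => false)
    = decide ((xs.countP (fun v => decide (c < v ∧ v ≤ 3)) : Int) < k) := by
  set vals := PySem.List.sorted (xs.filter (fun v => decide (v ≤ 3))) (fun x => x) true with hv
  have hperm : vals.Perm (xs.filter (fun v => decide (v ≤ 3))) :=
    PySem.List.sorted_perm _ _ _
  have hcp : vals.countP (fun x => decide (c < x)) =
      xs.countP (fun v => decide (c < v ∧ v ≤ 3)) := by
    rw [hperm.countP_eq, List.countP_filter]
    apply List.countP_congr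
    intro a _
    simp
  by_cases hlen : (vals.length : Int) < k
  · have hle := List.countP_le_length (l := vals) (p := fun x => decide (c < x))
    simp only [hlen, if_true]
    rw [← hcp]
    have : ((vals.countP (fun x => decide (c < x)) : Int)) < k := by
      have : (vals.countP (fun x => decide (c < x)) : Int) ≤ (vals.length : Int) := by
        exact_mod_cast hle
      omega
    simp [this]
  · simp only [hlen, if_false]
    have hklen : k ≤ (vals.length : Int) := by omega
    have hidx : (k - 1).toNat < vals.length := by omega
    have hcast : k - 1 = ((k - 1).toNat : Int) := by omega
    rw [hcast, PySem.List.pyGet?_natCast, List.getElem?_eq_getElem hidx]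
    have hpw : vals.Pairwise (fun a b => b ≤ a) := by
      have := PySem.List.sorted_pairwise_rev (xs.filter (fun v => decide (v ≤ 3))) (fun x : Int => x)
      simpa [hv] using this
    have hr := pv_rank vals c hpw (k - 1).toNat hidx
    rw [hcp] at hr
    simp only [decide_eq_decide]
    rw [hr]
    omega


-- evaluate B's port at a present key with nonnegative count
lemma pv_alt_eval (pc : List (String × Int)) (pk : String) (v : Int)
    (hnd : (pc.map Prod.fst).Nodup) (hv : (pk, v) ∈ pc) (hnnv : 0 ≤ v) :
    is_painting_required_alt pc pk =
      if v ≤ 2 then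
        decide (((pc.map Prod.snd).countP (fun w => decide (v < w ∧ w ≤ 3)) : Int) < 3 - v)
      else false := by
  unfold is_painting_required_alt
  rw [pv_find_eq hnd hv]
  by_cases h2 : v ≤ 2
  · have hg : ¬ ((pk, v).2 < 0 ∨ (pk, v).2 > 2) := by simp; omega
    simp only [hg, if_false, if_pos h2]
    exact pv_alt_rank (pc.map Prod.snd) v (3 - v) (by omega)
  · have hg : ((pk, v).2 < 0 ∨ (pk, v).2 > 2) := by simp; omega
    simp only [hg, if_true, if_neg h2]

-- ===== VERDICT (by name: the statement is the Claim_ definition above) =====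
theorem is_painting_required_spec : Claim_equal_is_painting_required := by
  intro pc pk _hdom hpre
  obtain ⟨hnd, hvmem, hnn⟩ := hpre
  obtain ⟨⟨pk', v⟩, hv, rfl⟩ : ∃ kv ∈ pc, kv.1 = pk := List.mem_map.1 hvmem
  have hnnv : 0 ≤ v := hnn _ hv
  unfold Spec_is_painting_required
  rw [pv_alt_eval pc pk' v hnd hv hnnv]
  unfold is_painting_required
  set l := PySem.List.sorted pc (fun x : String × Int => x.2) true with hl
  have hperm : l.Perm pc := PySem.List.sorted_perm pc _ true
  have hndl : (l.map Prod.fst).Nodup := ((hperm.map Prod.fst).nodup_iff).2 hnd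
  have hitems : (PySem.Dict.ofList l).items = l := by
    show (List.foldl (fun acc p => acc.insert p.1 p.2) PySem.Dict.empty l).items = l
    rw [PySem.Dict.items_foldl_insert_fresh l Prod.fst Prod.snd PySem.Dict.empty
      (fun a _ => PySem.Dict.contains_empty _) hndl]
    simp [PySem.Dict.empty]
  have hkeys : (PySem.Dict.ofList l).keys = l.map Prod.fst := by
    show (PySem.Dict.ofList l).items.map Prod.fst = _
    rw [hitems]
  have hvl : (pk', v) ∈ l := hperm.mem_iff.2 hv
  have hget : (PySem.Dict.ofList l).getD pk' 0 = v :=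
    PySem.Dict.getD_of_mem_items _ (by rw [hitems]; exact hvl) (hkeys ▸ hndl) 0
  have hvalmap : (l.map Prod.fst).map (fun k => (PySem.Dict.ofList l).getD k 0) = l.map Prod.snd := by
    have h1 := PySem.Dict.values_eq_map_keys (PySem.Dict.ofList l) (hkeys ▸ hndl) 0
    rw [hkeys] at h1
    calc (l.map Prod.fst).map (fun k => (PySem.Dict.ofList l).getD k 0)
        = (PySem.Dict.ofList l).values := h1.symm
      _ = (PySem.Dict.ofList l).items.map Prod.snd := rfl
      _ = l.map Prod.snd := by rw [hitems]
  have hfold' : List.foldl (fun freq key =>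
        if (PySem.Dict.ofList l).getD key 0 ≤ 3 then
          PySem.List.pySetD freq ((PySem.Dict.ofList l).getD key 0)
            (PySem.List.pyGetD freq ((PySem.Dict.ofList l).getD key 0) 0 + 1)
        else freq) ([0, 0, 0, 0] : List Int) (PySem.Dict.ofList l).keys =
      (l.map Prod.snd).foldl (fun freq f =>
        if f ≤ 3 then PySem.List.pySetD freq f (PySem.List.pyGetD freq f 0 + 1) else freq)
      [0, 0, 0, 0] := by
    rw [hkeys, ← hvalmap]
    simp only [List.foldl_map]
  have hnnl : ∀ w ∈ l.map Prod.snd, 0 ≤ w := by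
    intro w hw
    rcases List.mem_map.1 hw with ⟨kv, hkv, rfl⟩
    exact hnn kv (hperm.mem_iff.1 hkv)
  have hcount : ∀ p : Int → Bool,
      (pc.map Prod.snd).countP p = (l.map Prod.snd).countP p := by
    intro p
    exact ((hperm.map Prod.snd).countP_eq p).symm
  by_cases h0 : v = 0
  · subst h0
    norm_num [hget]
    simp only [hfold', pv_freq_fold (l.map Prod.snd) hnnl 0 0 0 0, PySem.List.pyGetD_ofNat']
    simp only [← Bool.decide_and, ← List.countP_map]
    rw [hcount (fun x => decide ((0:Int) < x ∧ x ≤ 3)), pv_cs0 (l.map Prod.snd) hnnl]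
    simp [List.getD]
    try simp only [decide_eq_decide]
    omega
  by_cases h1 : v = 1
  · subst h1
    norm_num [hget, h0]
    simp only [hfold', pv_freq_fold (l.map Prod.snd) hnnl 0 0 0 0, PySem.List.pyGetD_ofNat']
    simp only [← Bool.decide_and, ← List.countP_map]
    rw [hcount (fun x => decide ((1:Int) < x ∧ x ≤ 3)), pv_cs1 (l.map Prod.snd)]
    simp [List.getD]
    try simp only [decide_eq_decide]
    omega
  by_cases h2 : v = 2
  · subst h2
    norm_num [hget, h0, h1, -List.countP_eq_zero, -Nat.lt_one_iff]
    simp only [hfold', pv_freq_fold (l.map Prod.snd) hnnl 0 0 0 0, PySem.List.pyGetD_ofNat']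
    simp only [← Bool.decide_and, ← List.countP_map]
    rw [hcount (fun x => decide ((2:Int) < x ∧ x ≤ 3)), pv_cs2 (l.map Prod.snd)]
    simp [List.getD]
    try simp only [decide_eq_decide]
    try omega
  · have hle2 : ¬ v ≤ 2 := by omega
    norm_num [hget, h0, h1, h2, hle2]
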